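-- pv_equiv track=rewrite | github.com/dtdivyansh/Competemtive-Comding--- | mat2X2DigitSum.py | findMat2x2
-- ===== SOURCE A (Python) =====
-- def findMat2x2(arr,n,n2):
--     if n<2:
--         return []
--     else:
--         final = []
--         for i in range(n-1):
--             for j in range(n2-1):
--                 a1 = arr[i][j]
--                 a2 = arr[i][j+1]
--                 a3 = arr[i+1][j]
--                 a4 = arr[i+1][j+1]
--                 s = []
--                 val = [a1,a2,a3,a4]
--                 for num in val:
--                     su = 0
--                     while(num>0):
--                         su = su+(num%10)
--                         num = num//10
--                     s.append(su)
--
--                 temp = 1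
--                 for v in range(len(val)):
--                     if( val[v]%s[v]!=0 ):
--                         temp = 0
--                         break
--                 if(temp):
--                     final.append([[a1,a2],[a3,a4]])
--                 #else:
--                  #   continue
--         return final
-- ===== SOURCE B (Python) =====
-- def _dsum(num):
--     return 0 if num <= 0 else num % 10 + _dsum(num // 10)
--
--
-- def findMat2x2(arr, n, n2):
--     if n < 2:
--         return []
--     ds = [[_dsum(x) for x in row] for row in arr]
--
--     def ok(r, c):
--         return arr[r][c] % ds[r][c] == 0
--
--     return [[[arr[i][j], arr[i][j + 1]], [arr[i + 1][j], arr[i + 1][j + 1]]]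
--             for i in range(n - 1) for j in range(n2 - 1)
--             if ok(i, j) and ok(i, j + 1) and ok(i + 1, j) and ok(i + 1, j + 1)]
-- ===== Notes on version B (the rewrite author's own statement) =====
-- stated objective: simpler
-- what changed: B precomputes one 2D table of digit sums for the whole matrix (via a recursive digit-sum helper) and then emits the qualifying 2x2 windows with a single comprehension over short-circuited divisibility lookups, instead of A's per-window rebuild of the four digit sums with an explicit temp/break flag loop.
-- outside the precondition, e.g. on findMat2x2([[13, 2], [3, -5]], 2, 2): A returns [], B returns []
import Mathlib
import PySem

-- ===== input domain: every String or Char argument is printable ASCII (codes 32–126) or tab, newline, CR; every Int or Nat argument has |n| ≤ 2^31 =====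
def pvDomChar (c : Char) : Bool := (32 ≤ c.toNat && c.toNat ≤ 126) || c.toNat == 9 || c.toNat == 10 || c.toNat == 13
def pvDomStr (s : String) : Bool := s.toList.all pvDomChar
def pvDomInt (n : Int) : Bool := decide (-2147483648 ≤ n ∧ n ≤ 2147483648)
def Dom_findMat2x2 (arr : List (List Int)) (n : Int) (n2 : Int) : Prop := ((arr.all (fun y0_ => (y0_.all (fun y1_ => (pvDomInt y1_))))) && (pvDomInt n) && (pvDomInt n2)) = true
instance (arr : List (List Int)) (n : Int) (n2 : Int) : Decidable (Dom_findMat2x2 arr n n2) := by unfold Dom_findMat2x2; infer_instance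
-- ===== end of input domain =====

-- B precomputes one 2D digit-sum table and emits qualifying 2x2 windows by a comprehension,
-- instead of A's per-window recomputation of four digit sums with a temp/break flag loop (objective: simpler).

-- ===== PORT A =====
-- A's inner 'while num > 0' loop, accumulating su
def pvDigitSumA (num su : Int) : Int :=
  if 0 < num then pvDigitSumA (PySem.Int.floordiv num 10) (su + PySem.Int.mod num 10) else su
termination_by num.toNat
decreasing_by
  rw [PySem.Int.floordiv_eq_ediv_of_pos (by omega : (0:Int) < 10)]
  omega

-- A's 'for v in range(len(val))' loop with its break
def pvTempLoop (val s : List Int) : List Int → Int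
  | [] => 1
  | v :: rest =>
    if PySem.Int.mod (PySem.List.pyGetD val v 0) (PySem.List.pyGetD s v 0) ≠ 0 then 0
    else pvTempLoop val s rest

def findMat2x2 (arr : List (List Int)) (n : Int) (n2 : Int) : List (List (List Int)) :=
  if n < 2 then []
  else
    (PySem.List.pyRange 0 (n - 1) 1).foldl (fun final i =>
      (PySem.List.pyRange 0 (n2 - 1) 1).foldl (fun final j =>
        let a1 := PySem.List.pyGetD (PySem.List.pyGetD arr i []) j 0
        let a2 := PySem.List.pyGetD (PySem.List.pyGetD arr i []) (j + 1) 0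
        let a3 := PySem.List.pyGetD (PySem.List.pyGetD arr (i + 1) []) j 0
        let a4 := PySem.List.pyGetD (PySem.List.pyGetD arr (i + 1) []) (j + 1) 0
        let val := [a1, a2, a3, a4]
        let s := val.foldl (fun s num => s ++ [pvDigitSumA num 0]) []
        let temp := pvTempLoop val s (PySem.List.pyRange 0 (val.length : Int) 1)
        if temp ≠ 0 then final ++ [[[a1, a2], [a3, a4]]] else final) final) []

-- ===== PORT B =====
-- B's recursive digit-sum helper (_dsum)
def pvDsum (num : Int) : Int :=
  if num ≤ 0 then 0 else PySem.Int.mod num 10 + pvDsum (PySem.Int.floordiv num 10)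
termination_by num.toNat
decreasing_by
  rw [PySem.Int.floordiv_eq_ediv_of_pos (by omega : (0:Int) < 10)]
  omega

def findMat2x2_alt (arr : List (List Int)) (n : Int) (n2 : Int) : List (List (List Int)) :=
  if n < 2 then []
  else
    let ds := arr.map (fun row => row.map pvDsum)
    let ok := fun (r c : Int) =>
      PySem.Int.mod (PySem.List.pyGetD (PySem.List.pyGetD arr r []) c 0)
                    (PySem.List.pyGetD (PySem.List.pyGetD ds r []) c 0) == 0
    (PySem.List.pyRange 0 (n - 1) 1).flatMap (fun i =>
      ((PySem.List.pyRange 0 (n2 - 1) 1).filter (fun j =>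
          ok i j && ok i (j + 1) && ok (i + 1) j && ok (i + 1) (j + 1))).map (fun j =>
        [[PySem.List.pyGetD (PySem.List.pyGetD arr i []) j 0,
          PySem.List.pyGetD (PySem.List.pyGetD arr i []) (j + 1) 0],
         [PySem.List.pyGetD (PySem.List.pyGetD arr (i + 1) []) j 0,
          PySem.List.pyGetD (PySem.List.pyGetD arr (i + 1) []) (j + 1) 0]]))

-- ===== PRECONDITION & SPEC =====
-- Pre_ excludes the inputs where A raises: IndexError when the scanned n×n2 window does not fit in arr,
-- and ZeroDivisionError when a scanned cell is ≤ 0 (digit sum 0). Requiring EVERY scanned cell positive is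
-- slightly stronger than exact no-raise (a nonpositive cell escapes the division only when an earlier cell
-- of every window containing it already fails divisibility; A and B return the same [] there anyway).
def Pre_findMat2x2 (arr : List (List Int)) (n : Int) (n2 : Int) : Prop :=
  2 ≤ n → 2 ≤ n2 →
    (n.toNat ≤ arr.length ∧
      ∀ row ∈ arr.take n.toNat, n2.toNat ≤ row.length ∧ ∀ x ∈ row.take n2.toNat, 0 < x)
instance (arr : List (List Int)) (n : Int) (n2 : Int) : Decidable (Pre_findMat2x2 arr n n2) := by
  unfold Pre_findMat2x2; infer_instance

def pvWitness_findMat2x2 : List (List Int) × Int × Int := ([[10, 2], [3, 24]], 2, 2)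

def Spec_findMat2x2 (arr : List (List Int)) (n : Int) (n2 : Int) (out : List (List (List Int))) : Prop := out = findMat2x2_alt arr n n2
instance (arr : List (List Int)) (n : Int) (n2 : Int) (out : List (List (List Int))) : Decidable (Spec_findMat2x2 arr n n2 out) := by unfold Spec_findMat2x2; infer_instance

-- ===== CLAIM (what is proved, stated in full; the proofs are below) =====
def Claim_equal_findMat2x2 : Prop := ∀ (arr : List (List Int)) (n : Int) (n2 : Int), Dom_findMat2x2 arr n n2 → Pre_findMat2x2 arr n n2 → Spec_findMat2x2 arr n n2 (findMat2x2 arr n n2)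

-- ===== LEMMAS AND PROOFS =====

theorem pvDigitSumA_eq (num su : Int) : pvDigitSumA num su = su + pvDsum num := by
  fun_induction pvDigitSumA num su with
  | case1 num su h ih =>
    rw [ih]
    conv_rhs => rw [pvDsum]
    rw [if_neg (show ¬ num ≤ 0 by omega)]
    ring
  | case2 num su h =>
    rw [pvDsum, if_pos (show num ≤ 0 by omega), add_zero]

theorem pvDsum_zero : pvDsum 0 = 0 := by rw [pvDsum]; simp

theorem pvDs_lookup (arr : List (List Int)) (i j : Int) :
    PySem.List.pyGetD (PySem.List.pyGetD (arr.map (fun row => row.map pvDsum)) i []) j 0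
      = pvDsum (PySem.List.pyGetD (PySem.List.pyGetD arr i []) j 0) := by
  have h1 : PySem.List.pyGetD (arr.map (fun row => row.map pvDsum)) i ([] : List Int)
      = (PySem.List.pyGetD arr i []).map pvDsum := by
    simpa using PySem.List.pyGetD_map (fun row : List Int => row.map pvDsum) arr i []
  rw [h1]
  conv_lhs => rw [show (0:Int) = pvDsum 0 from pvDsum_zero.symm]
  exact PySem.List.pyGetD_map pvDsum _ j 0

theorem pvTemp_cond (a1 a2 a3 a4 : Int) :
    (pvTempLoop [a1, a2, a3, a4]
        ([a1, a2, a3, a4].foldl (fun s num => s ++ [pvDigitSumA num 0]) [])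
        (PySem.List.pyRange 0 (([a1, a2, a3, a4] : List Int).length : Int) 1) ≠ 0)
      ↔ ((PySem.Int.mod a1 (pvDsum a1) == 0) && (PySem.Int.mod a2 (pvDsum a2) == 0) &&
         (PySem.Int.mod a3 (pvDsum a3) == 0) && (PySem.Int.mod a4 (pvDsum a4) == 0)) = true := by
  rw [show ((([a1, a2, a3, a4] : List Int).length : Int)) = (4:Int) by simp]
  rw [show PySem.List.pyRange 0 (4:Int) 1 = [0, 1, 2, 3] from by decide]
  simp only [List.foldl, List.nil_append]
  simp only [pvTempLoop, pvDigitSumA_eq, zero_add]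
  simp only [PySem.List.pyGetD_ofNat' ]
  norm_num [List.getD]
  tauto

theorem findMat2x2_eq_alt (arr : List (List Int)) (n : Int) (n2 : Int) :
    findMat2x2 arr n n2 = findMat2x2_alt arr n n2 := by
  unfold findMat2x2 findMat2x2_alt
  by_cases hn : n < 2
  · simp [hn]
  · rw [if_neg hn, if_neg hn]
    simp only [pvTemp_cond, pvDs_lookup]
    simp only [PySem.List.foldl_append_if]
    simp only [PySem.List.foldl_append_eq_flatMap]
    simp

-- ===== VERDICT (by name: the statement is the Claim_ definition above) =====
theorem findMat2x2_spec : Claim_equal_findMat2x2 := by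
  intro arr n n2 _ _
  unfold Spec_findMat2x2
  exact findMat2x2_eq_alt arr n n2
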